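-- pv_equiv track=rewrite | github.com/ogradyc/python-practice | rotational_cipher.py | create_cypher_dict
-- ===== SOURCE A (Python) =====
-- alpha = 'abcdefghigjlmnopqrstuvwxyz'
--
-- nums = '1234567890'
--
-- def reduce_rotation(rotation_factor, string):
--   if rotation_factor > len(string):
--     result = rotation_factor % len(string)
--   else:
--     result = rotation_factor
--   return result
--
-- def create_cypher_dict(rotation_factor):
--   alpha_rotation = reduce_rotation(rotation_factor, alpha)
--   nums_rotation = reduce_rotation(rotation_factor, nums)
--   cypher_dict = {}
--   alpha_r = alpha[alpha_rotation:] + alpha[:alpha_rotation]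
--   nums_r = nums[nums_rotation:] +  nums[:nums_rotation]
--   alpha_nums = alpha + nums
--   alpha_nums_r = alpha_r + nums_r
--
--   for i in range(len(alpha_nums)):
--     cypher_dict[alpha_nums[i]] = alpha_nums_r[i]
--
--   return cypher_dict
-- ===== SOURCE B (Python) =====
-- alpha = 'abcdefghigjlmnopqrstuvwxyz'
--
-- nums = '1234567890'
--
-- def create_cypher_dict(rotation_factor):
--   cypher_dict = {}
--   for i, c in enumerate(alpha):
--     cypher_dict[c] = alpha[(i + rotation_factor) % 26]
--   for i, c in enumerate(nums):
--     cypher_dict[c] = nums[(i + rotation_factor) % 10]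
--   return cypher_dict
-- ===== Notes on version B (the rewrite author's own statement) =====
-- stated objective: simpler
-- what changed: B drops the reduce_rotation helper and the rotated-string slice concatenation: it assigns each letter alpha[(i+rotation_factor)%26] and each digit nums[(i+rotation_factor)%10] directly by modular index in two enumerate loops.
-- intended difference: For rotation factors below -len(alphabet) whose shift is not a multiple of the length (rotation_factor < -26 with rotation_factor % 26 != 0 for letters, rotation_factor < -10 with rotation_factor % 10 != 0 for digits), A's reduce_rotation never reduces negatives so the slice clamps and A maps that alphabet to itself unrotated, while B returns the proper modular rotation, which is the intended cipher. — e.g. on create_cypher_dict(-27): A returns [("a", "a"), ("b", "b"), ("c", "c"), ("d", "d"), ("e", "e"), ("f", "f"), ("g", "g"), ("h", "h"), ("i", "i"), ("j", "j")…, B returns [("a", "z"), ("b", "a"), ("c", "b"), ("d", "c"), ("e", "d"), ("f", "e"), ("g", "i"), ("h", "g"), ("i", "h"), ("j", "g")…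
import Mathlib
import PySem

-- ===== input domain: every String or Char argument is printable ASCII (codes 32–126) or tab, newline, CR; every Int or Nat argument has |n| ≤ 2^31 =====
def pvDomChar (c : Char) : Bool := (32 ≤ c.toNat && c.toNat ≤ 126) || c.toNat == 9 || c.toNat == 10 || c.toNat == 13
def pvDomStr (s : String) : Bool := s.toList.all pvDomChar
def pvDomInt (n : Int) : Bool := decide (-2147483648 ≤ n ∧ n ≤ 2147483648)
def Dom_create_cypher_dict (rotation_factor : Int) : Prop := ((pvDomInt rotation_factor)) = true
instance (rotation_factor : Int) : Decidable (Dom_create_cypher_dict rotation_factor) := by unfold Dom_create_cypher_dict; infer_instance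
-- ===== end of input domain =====

set_option maxRecDepth 32000
set_option maxHeartbeats 2000000


-- B replaces A's reduce_rotation helper and rotated-string slicing by direct modular
-- indexing (alpha[(i+r)%26], nums[(i+r)%10]) in two enumerate loops; for rotation
-- factors below -len A's slices clamp to the identity while B rotates properly (D_ below).
-- Both ports model Python's one-character strings (the indexed characters used as dict
-- keys/values) as Char inside the dict and wrap each into a String at the return boundary.

def wrapPairs (l : List (Char × Char)) : List (String × String) :=
  l.map (fun p => (String.ofList [p.1], String.ofList [p.2]))

-- ===== PORT A =====
-- the module constants alpha = 'abcdefghigjlmnopqrstuvwxyz' and nums = '1234567890',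
-- kept as their character lists (they are only ever indexed character by character)
def pvAlpha : List Char :=
  ['a','b','c','d','e','f','g','h','i','g','j','l','m',
   'n','o','p','q','r','s','t','u','v','w','x','y','z']
def pvNums : List Char := ['1','2','3','4','5','6','7','8','9','0']

def reduce_rotation (rotation_factor : Int) (s : List Char) : Int :=
  if rotation_factor > (s.length : Int) then PySem.Int.mod rotation_factor (s.length : Int)
  else rotation_factor

-- body of A after the two reduce_rotation calls (alpha_nums[i] / alpha_nums_r[i] are
-- always in range, so pyGetD never takes its default)
def aItems (alpha_rotation nums_rotation : Int) : List (Char × Char) :=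
  let alpha_r := PySem.List.slice pvAlpha (some alpha_rotation) none
                  ++ PySem.List.slice pvAlpha none (some alpha_rotation)
  let nums_r := PySem.List.slice pvNums (some nums_rotation) none
                  ++ PySem.List.slice pvNums none (some nums_rotation)
  let alpha_nums := pvAlpha ++ pvNums
  let alpha_nums_r := alpha_r ++ nums_r
  ((PySem.List.pyRange 0 (alpha_nums.length : Int) 1).foldl
    (fun d i => d.insert (PySem.List.pyGetD alpha_nums i ' ')
                         (PySem.List.pyGetD alpha_nums_r i ' '))
    (PySem.Dict.empty : PySem.Dict Char Char)).items

def create_cypher_dict (rotation_factor : Int) : List (String × String) :=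
  wrapPairs (aItems (reduce_rotation rotation_factor pvAlpha)
                    (reduce_rotation rotation_factor pvNums))

-- ===== PORT B =====
-- B's image of the character at index i: s[(i + rotation_factor) % n] (always in range)
def bImg (s : List Char) (n rotation_factor i : Int) : Char :=
  PySem.List.pyGetD s (PySem.Int.mod (i + rotation_factor) n) ' '

def bItems (rotation_factor : Int) : List (Char × Char) :=
  let d := (PySem.List.enumerate pvAlpha 0).foldl
    (fun d p => d.insert p.2 (bImg pvAlpha 26 rotation_factor p.1))
    (PySem.Dict.empty : PySem.Dict Char Char)
  let d := (PySem.List.enumerate pvNums 0).foldl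
    (fun d p => d.insert p.2 (bImg pvNums 10 rotation_factor p.1))
    d
  d.items

def create_cypher_dict_alt (rotation_factor : Int) : List (String × String) :=
  wrapPairs (bItems rotation_factor)

-- ===== PRECONDITION & SPEC =====
-- For rotation factors below -len whose shift is not a multiple of the length
-- (rotation_factor < -26 with rotation_factor % 26 ≠ 0 for the letters, rotation_factor
-- < -10 with rotation_factor % 10 ≠ 0 for the digits), A's reduce_rotation never reduces
-- negatives, the slice clamps, and A maps that alphabet to itself unrotated; B returns
-- the proper modular rotation, which is the intended cipher.
def D_create_cypher_dict (rotation_factor : Int) : Prop :=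
  (rotation_factor < -26 ∧ rotation_factor % 26 ≠ 0) ∨
  (rotation_factor < -10 ∧ rotation_factor % 10 ≠ 0)
instance (rotation_factor : Int) : Decidable (D_create_cypher_dict rotation_factor) := by
  unfold D_create_cypher_dict; infer_instance

def Spec_create_cypher_dict (rotation_factor : Int) (out : List (String × String)) : Prop :=
  ¬ D_create_cypher_dict rotation_factor → out = create_cypher_dict_alt rotation_factor
instance (rotation_factor : Int) (out : List (String × String)) :
    Decidable (Spec_create_cypher_dict rotation_factor out) := by
  unfold Spec_create_cypher_dict; infer_instance

def pvDiffWitness_create_cypher_dict : Int := -27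
def pvDiffWitnessOut_create_cypher_dict : (List (String × String)) × (List (String × String)) :=
  ([("a", "a"), ("b", "b"), ("c", "c"), ("d", "d"), ("e", "e"), ("f", "f"), ("g", "g"),
    ("h", "h"), ("i", "i"), ("j", "j"), ("l", "l"), ("m", "m"), ("n", "n"), ("o", "o"),
    ("p", "p"), ("q", "q"), ("r", "r"), ("s", "s"), ("t", "t"), ("u", "u"), ("v", "v"),
    ("w", "w"), ("x", "x"), ("y", "y"), ("z", "z"), ("1", "1"), ("2", "2"), ("3", "3"),
    ("4", "4"), ("5", "5"), ("6", "6"), ("7", "7"), ("8", "8"), ("9", "9"), ("0", "0")],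
   [("a", "z"), ("b", "a"), ("c", "b"), ("d", "c"), ("e", "d"), ("f", "e"), ("g", "i"),
    ("h", "g"), ("i", "h"), ("j", "g"), ("l", "j"), ("m", "l"), ("n", "m"), ("o", "n"),
    ("p", "o"), ("q", "p"), ("r", "q"), ("s", "r"), ("t", "s"), ("u", "t"), ("v", "u"),
    ("w", "v"), ("x", "w"), ("y", "x"), ("z", "y"), ("1", "4"), ("2", "5"), ("3", "6"),
    ("4", "7"), ("5", "8"), ("6", "9"), ("7", "0"), ("8", "1"), ("9", "2"), ("0", "3")])

-- ===== CLAIM (what is proved, stated in full; the proofs are below) =====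
def Claim_unchanged_create_cypher_dict : Prop := ∀ (rotation_factor : Int), Dom_create_cypher_dict rotation_factor → Spec_create_cypher_dict rotation_factor (create_cypher_dict rotation_factor)
def Claim_changed_create_cypher_dict : Prop := Dom_create_cypher_dict (pvDiffWitness_create_cypher_dict) ∧ D_create_cypher_dict (pvDiffWitness_create_cypher_dict) ∧ create_cypher_dict (pvDiffWitness_create_cypher_dict) = pvDiffWitnessOut_create_cypher_dict.1 ∧ create_cypher_dict_alt (pvDiffWitness_create_cypher_dict) = pvDiffWitnessOut_create_cypher_dict.2 ∧ pvDiffWitnessOut_create_cypher_dict.1 ≠ pvDiffWitnessOut_create_cypher_dict.2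

-- ===== LEMMAS AND PROOFS =====

-- `xs` rotated left by `m` positions
def rotCat (xs : List Char) (m : Nat) : List Char := xs.drop m ++ xs.take m

-- A's dict-building loop with the two rotated strings in drop/take normal form
def aRot (m26 m10 : Nat) : List (Char × Char) :=
  let alpha_nums := pvAlpha ++ pvNums
  let alpha_nums_r := rotCat pvAlpha m26 ++ rotCat pvNums m10
  ((PySem.List.pyRange 0 (alpha_nums.length : Int) 1).foldl
    (fun d i => d.insert (PySem.List.pyGetD alpha_nums i ' ')
                         (PySem.List.pyGetD alpha_nums_r i ' '))
    (PySem.Dict.empty : PySem.Dict Char Char)).items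

theorem len_alpha : pvAlpha.length = 26 := by decide
theorem len_nums : pvNums.length = 10 := by decide

theorem slice_rot (xs : List Char) (n : Nat) (hx : xs.length = n)
    (a : Int) (m : Nat)
    (hm : (0 ≤ a ∧ a < (n : Int) ∧ m = a.toNat) ∨ (a = (n : Int) ∧ m = 0) ∨
          (a < 0 ∧ -(n : Int) ≤ a ∧ (m : Int) = (n : Int) + a)) :
    PySem.List.slice xs (some a) none ++ PySem.List.slice xs none (some a)
      = rotCat xs m := by
  unfold rotCat
  rcases hm with ⟨ha, hlt, hme⟩ | ⟨he, hme⟩ | ⟨ha, hge, hme⟩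
  · rw [PySem.List.slice_from xs ha, PySem.List.slice_to xs ha, hme]
  · rw [PySem.List.slice_from xs (by omega), PySem.List.slice_to xs (by omega), hme,
        show a.toNat = n by omega, ← hx, List.drop_length, List.take_length,
        List.drop_zero, List.take_zero, List.nil_append, List.append_nil]
  · have h0k : 0 < (-a).toNat := by omega
    have hk : a = -(((-a).toNat : Nat) : Int) := by omega
    rw [hk, PySem.List.slice_from_neg_natCast xs (-a).toNat h0k,
        PySem.List.slice_to_neg_natCast xs (-a).toNat h0k, hx,
        show n - (-a).toNat = m by omega]

theorem slice_clamp (xs : List Char) (n : Nat) (hx : xs.length = n) (hn : 0 < n)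
    (a : Int) (h : a ≤ -(n : Int)) :
    PySem.List.slice xs (some a) none ++ PySem.List.slice xs none (some a)
      = rotCat xs 0 := by
  unfold rotCat
  have h0k : 0 < (-a).toNat := by omega
  have hk : a = -(((-a).toNat : Nat) : Int) := by omega
  rw [hk, PySem.List.slice_from_neg_natCast xs (-a).toNat h0k,
      PySem.List.slice_to_neg_natCast xs (-a).toNat h0k, hx,
      show n - (-a).toNat = 0 by omega]

theorem aItems_rot (k26 k10 : Int) (m26 m10 : Nat)
    (h26 : PySem.List.slice pvAlpha (some k26) none ++ PySem.List.slice pvAlpha none (some k26)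
            = rotCat pvAlpha m26)
    (h10 : PySem.List.slice pvNums (some k10) none ++ PySem.List.slice pvNums none (some k10)
            = rotCat pvNums m10) :
    aItems k26 k10 = aRot m26 m10 := by
  simp only [aItems, aRot]
  rw [h26, h10]

-- a loop inserting (f x, g x) is the fold of insert over the mapped pair list
theorem foldl_insert_pairs {α : Type} (f : α → Char) (g : α → Char) (l : List α)
    (d : PySem.Dict Char Char) :
    l.foldl (fun d x => d.insert (f x) (g x)) d
      = (l.map (fun x => (f x, g x))).foldl (fun d p => d.insert p.1 p.2) d := by
  induction l generalizing d with
  | nil => rfl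
  | cons x xs ih => simp only [List.foldl_cons, List.map_cons, ih]

-- index characterization of the rotated list
theorem rotCat_getElem (xs : List Char) (n : Nat) (hx : xs.length = n) (m i : Nat)
    (hm : m < n) (hi : i < n) (hilen : i < (rotCat xs m).length) :
    (rotCat xs m)[i] = xs[(m + i) % n]'(by rw [hx]; exact Nat.mod_lt _ (by omega)) := by
  unfold rotCat at hilen ⊢
  rw [List.getElem_append]
  split_ifs with hcase
  · rw [List.getElem_drop]
    have hlt : m + i < n := by
      have := hcase; rw [List.length_drop, hx] at this; omega
    simp only [Nat.mod_eq_of_lt hlt]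
  · rw [List.getElem_take]
    have hge : n - m ≤ i := by
      rw [List.length_drop, hx] at hcase; omega
    have hidx : (m + i) % n = i - (n - m) := by
      have hsum : m + i = (i - (n - m)) + n := by omega
      rw [hsum, Nat.add_mod_right, Nat.mod_eq_of_lt (by omega)]
    simp only [List.length_drop, hx, hidx]

-- the heart of the file: A's rotated-pairing loop equals B's modular-index loops
theorem aRot_eq_bItems (r : Int) (m26 m10 : Nat) (hm26 : m26 < 26) (hm10 : m10 < 10)
    (e26 : (m26 : Int) = r % 26) (e10 : (m10 : Int) = r % 10) :
    aRot m26 m10 = bItems r := by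
  have hmod26 : ∀ x : Int, PySem.Int.mod x 26 = x % 26 :=
    fun x => PySem.Int.mod_eq_emod_of_pos (by norm_num)
  have hmod10 : ∀ x : Int, PySem.Int.mod x 10 = x % 10 :=
    fun x => PySem.Int.mod_eq_emod_of_pos (by norm_num)
  have hlen : (((pvAlpha ++ pvNums).length : Nat) : Int) = 36 := by
    simp [List.length_append, len_alpha, len_nums]
  have hrlenA : (rotCat pvAlpha m26).length = 26 := by
    simp [rotCat, len_alpha]; omega
  have hrlenN : (rotCat pvNums m10).length = 10 := by
    simp [rotCat, len_nums]; omega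
  simp only [aRot, bItems, bImg, hmod26, hmod10, hlen]
  rw [foldl_insert_pairs (fun i => PySem.List.pyGetD (pvAlpha ++ pvNums) i ' ')
        (fun i => PySem.List.pyGetD (rotCat pvAlpha m26 ++ rotCat pvNums m10) i ' '),
      foldl_insert_pairs (fun p : Int × Char => p.2)
        (fun p : Int × Char => PySem.List.pyGetD pvAlpha ((p.1 + r) % 26) ' '),
      foldl_insert_pairs (fun p : Int × Char => p.2)
        (fun p : Int × Char => PySem.List.pyGetD pvNums ((p.1 + r) % 10) ' '),
      ← List.foldl_append]
  apply congrArg PySem.Dict.items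
  apply congrArg
  apply List.ext_getElem
  · simp [PySem.List.length_pyRange_one, PySem.List.length_enumerate, len_alpha, len_nums]
  intro i hi1 hi2
  have hi36 : i < 36 := by
    simpa [PySem.List.length_pyRange_one] using hi1
  simp only [List.getElem_map, PySem.List.getElem_pyRange_one, zero_add,
             List.getElem_append, List.length_map, PySem.List.length_enumerate,
             len_alpha, PySem.List.getElem_enumerate]
  split_ifs with hc
  · -- letter position: i < 26
    simp only [Prod.mk.injEq]
    constructor
    · -- keys agree
      rw [PySem.List.pyGetD_natCast,
          List.getD_eq_getElem _ _ (by simp [len_alpha, len_nums]; omega),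
          List.getElem_append]
      simp [len_alpha, hc]
    · -- values agree
      rw [PySem.List.pyGetD_natCast,
          List.getD_eq_getElem _ _ (by simp [hrlenA, hrlenN]; omega),
          List.getElem_append]
      rw [dif_pos (by rw [hrlenA]; omega)]
      rw [rotCat_getElem pvAlpha 26 len_alpha m26 i hm26 hc]
      have hlt : ((i : Int) + r) % 26 < (pvAlpha.length : Int) := by
        rw [len_alpha]; omega
      rw [PySem.List.pyGetD_eq_getElem pvAlpha ' ' (by omega) hlt]
      have hidx : (m26 + i) % 26 = (((i : Int) + r) % 26).toNat := by omega
      simp only [hidx]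
  · -- digit position: 26 ≤ i < 36
    simp only [Prod.mk.injEq]
    constructor
    · rw [PySem.List.pyGetD_natCast,
          List.getD_eq_getElem _ _ (by simp [len_alpha, len_nums]; omega),
          List.getElem_append]
      simp [len_alpha, hc]
    · rw [PySem.List.pyGetD_natCast,
          List.getD_eq_getElem _ _ (by simp [hrlenA, hrlenN]; omega),
          List.getElem_append]
      rw [dif_neg (by rw [hrlenA]; omega)]
      rw [show ∀ h, (rotCat pvNums m10)[i - (rotCat pvAlpha m26).length]'h
            = (rotCat pvNums m10)[i - 26]'(by rw [hrlenN]; omega) from by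
        intro h; simp only [hrlenA]]
      rw [rotCat_getElem pvNums 10 len_nums m10 (i - 26) hm10 (by omega)]
      have hlt : ((((i - 26 : Nat) : Int) + r) % 10) < (pvNums.length : Int) := by
        rw [len_nums]; omega
      rw [PySem.List.pyGetD_eq_getElem pvNums ' ' (by omega) hlt]
      have hidx : (m10 + (i - 26)) % 10 = ((((i - 26 : Nat) : Int) + r) % 10).toNat := by
        omega
      simp only [hidx]

theorem reduce26 (r : Int) : reduce_rotation r pvAlpha = if 26 < r then r % 26 else r := by
  unfold reduce_rotation
  rw [show ((pvAlpha.length : Nat) : Int) = 26 by simp [len_alpha],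
      PySem.Int.mod_eq_emod_of_pos (by norm_num : (0:Int) < 26)]

theorem reduce10 (r : Int) : reduce_rotation r pvNums = if 10 < r then r % 10 else r := by
  unfold reduce_rotation
  rw [show ((pvNums.length : Nat) : Int) = 10 by simp [len_nums],
      PySem.Int.mod_eq_emod_of_pos (by norm_num : (0:Int) < 10)]

-- ===== VERDICT (by name: the statement is the Claim_ definition above) =====
theorem create_cypher_dict_spec : Claim_unchanged_create_cypher_dict := by
  intro r _ hnd
  unfold D_create_cypher_dict at hnd
  push_neg at hnd
  show create_cypher_dict r = create_cypher_dict_alt r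
  unfold create_cypher_dict create_cypher_dict_alt
  rw [reduce26, reduce10]
  refine congrArg wrapPairs ?_
  by_cases h1 : 26 < r
  · rw [if_pos h1, if_pos (by omega : 10 < r),
        aItems_rot _ _ _ _
          (slice_rot pvAlpha 26 len_alpha (r % 26) ((r % 26).toNat) (by omega))
          (slice_rot pvNums 10 len_nums (r % 10) ((r % 10).toNat) (by omega))]
    exact aRot_eq_bItems r _ _ (by omega) (by omega) (by omega) (by omega)
  · rw [if_neg h1]
    by_cases h2 : -26 ≤ r
    · by_cases h3 : 10 < r
      · rw [if_pos h3,
            aItems_rot _ _ _ _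
              (slice_rot pvAlpha 26 len_alpha r ((r % 26).toNat) (by omega))
              (slice_rot pvNums 10 len_nums (r % 10) ((r % 10).toNat) (by omega))]
        exact aRot_eq_bItems r _ _ (by omega) (by omega) (by omega) (by omega)
      · rw [if_neg h3]
        by_cases h4 : -10 ≤ r
        · rw [aItems_rot _ _ _ _
              (slice_rot pvAlpha 26 len_alpha r ((r % 26).toNat) (by omega))
              (slice_rot pvNums 10 len_nums r ((r % 10).toNat) (by omega))]
          exact aRot_eq_bItems r _ _ (by omega) (by omega) (by omega) (by omega)
        · have h10 : r % 10 = 0 := hnd.2 (by omega)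
          rw [aItems_rot _ _ _ _
              (slice_rot pvAlpha 26 len_alpha r ((r % 26).toNat) (by omega))
              (slice_clamp pvNums 10 len_nums (by norm_num) r (by omega))]
          exact aRot_eq_bItems r _ _ (by omega) (by omega) (by omega) (by omega)
    · have h26 : r % 26 = 0 := hnd.1 (by omega)
      have h10 : r % 10 = 0 := hnd.2 (by omega)
      rw [if_neg (by omega : ¬ 10 < r),
          aItems_rot _ _ _ _
            (slice_clamp pvAlpha 26 len_alpha (by norm_num) r (by omega))
            (slice_clamp pvNums 10 len_nums (by norm_num) r (by omega))]
      exact aRot_eq_bItems r _ _ (by omega) (by omega) (by omega) (by omega)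

theorem create_cypher_dict_changed : Claim_changed_create_cypher_dict := by
  unfold Claim_changed_create_cypher_dict
  refine ⟨by decide, by decide, ?_, ?_, by decide⟩
  · show create_cypher_dict (-27) = _
    unfold create_cypher_dict
    rw [reduce26, reduce10]
    norm_num
    rw [aItems_rot _ _ _ _
          (slice_clamp pvAlpha 26 len_alpha (by norm_num) (-27) (by norm_num))
          (slice_clamp pvNums 10 len_nums (by norm_num) (-27) (by norm_num))]
    rfl
  · show create_cypher_dict_alt (-27) = _
    rfl
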